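-- pv_equiv track=rewrite | github.com/CameronHercus/Codewars-Projects | Python/6 kyu/alternating_string_encryption.py | encrypt
-- ===== SOURCE A (Python) =====
-- def encrypt(text, n):
--     """6 kyu - Simple Encryption #1 - Alternating Split"""
--     blank = [[], []]
--     for j in range(n):
--         for i in range(len(text)):
--             blank[i%2].append(text[i])
--         text =  "".join(blank[1]) + "".join(blank[0])
--         blank = [[], []]
--     return text
-- ===== SOURCE B (Python) =====
-- def encrypt(text, n):
--     """6 kyu - Simple Encryption #1 - Alternating Split"""
--     L = len(text)
--     half = L // 2
--     # one-step source permutation: result[j] = text[perm[j]]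
--     perm = [2 * j + 1 if j < half else 2 * (j - half) for j in range(L)]
--     # binary exponentiation of the permutation: res = perm**e
--     res = list(range(L))
--     p = perm
--     e = n if n > 0 else 0
--     while e > 0:
--         if e % 2 == 1:
--             res = [p[k] for k in res]
--         p = [p[k] for k in p]
--         e //= 2
--     return "".join(text[k] for k in res)
-- ===== Notes on version B (the rewrite author's own statement) =====
-- stated objective: faster
-- what changed: Instead of re-splitting the string n times, B builds the one-step source-index permutation once and raises it to the n-th power by square-and-multiply on index tables, applying it to the text a single time.
import Mathlib
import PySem

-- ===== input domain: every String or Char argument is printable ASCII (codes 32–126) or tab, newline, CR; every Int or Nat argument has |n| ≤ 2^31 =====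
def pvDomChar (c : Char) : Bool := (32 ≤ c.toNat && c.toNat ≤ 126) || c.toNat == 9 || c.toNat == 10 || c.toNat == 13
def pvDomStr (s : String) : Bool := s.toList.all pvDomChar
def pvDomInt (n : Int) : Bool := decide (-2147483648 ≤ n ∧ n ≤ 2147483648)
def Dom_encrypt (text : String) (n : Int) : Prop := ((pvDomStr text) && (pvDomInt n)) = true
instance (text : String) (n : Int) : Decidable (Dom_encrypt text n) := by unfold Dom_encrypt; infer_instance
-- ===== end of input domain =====

-- B replaces A's n-fold O(L) re-splitting of the string by binary exponentiation of the
-- one-step index permutation, applied once: O(L log n) instead of O(n·L).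

-- ===== PORT A =====
-- literal port of A: n outer passes; inner loop appends text[i] to blank[i%2];
-- i ranges over [0, len(text)), so text[i] never raises and pyGetD is exact there.
def encrypt (text : String) (n : Int) : String :=
  String.mk ((PySem.List.pyRange 0 n 1).foldl (fun (t : List Char) _ =>
    let blank := (PySem.List.pyRange 0 (t.length : Int) 1).foldl
      (fun (b : List Char × List Char) i =>
        if PySem.Int.mod i 2 = 0 then (b.1 ++ [PySem.List.pyGetD t i ' '], b.2)
        else (b.1, b.2 ++ [PySem.List.pyGetD t i ' ']))
      ([], [])
    blank.2 ++ blank.1) text.toList)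

-- ===== PORT B =====
-- the while-loop of Source B: square-and-multiply on index tables (indices are in-range Nats,
-- so Python's p[k] never raises and getD is exact there)
def bSquareLoop (p res : List Nat) (e : Nat) : List Nat :=
  if e = 0 then res
  else bSquareLoop (p.map (fun k => p.getD k 0))
       (if e % 2 = 1 then res.map (fun k => p.getD k 0) else res) (e / 2)
  termination_by e
  decreasing_by omega

def encrypt_alt (text : String) (n : Int) : String :=
  let cs := text.toList
  let L := cs.length
  let half := L / 2
  let perm := (List.range L).map (fun j => if j < half then 2*j+1 else 2*(j-half))
  let res := bSquareLoop perm (List.range L) (if 0 < n then n.toNat else 0)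
  String.mk (res.map (fun k => cs.getD k ' '))

-- ===== PRECONDITION & SPEC =====
def Spec_encrypt (text : String) (n : Int) (out : String) : Prop := out = encrypt_alt text n
instance (text : String) (n : Int) (out : String) : Decidable (Spec_encrypt text n out) := by unfold Spec_encrypt; infer_instance

-- ===== CLAIM (what is proved, stated in full; the proofs are below) =====
def Claim_equal_encrypt : Prop := ∀ (text : String) (n : Int), Dom_encrypt text n → Spec_encrypt text n (encrypt text n)

-- ===== LEMMAS AND PROOFS =====

-- the one-step source-index map: after one split, position j holds the char from fsrc L j
def fsrc (L j : Nat) : Nat := if j < L / 2 then 2*j+1 else 2*(j - L/2)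

lemma fsrc_lt {L j : Nat} (h : j < L) : fsrc L j < L := by
  unfold fsrc; split_ifs <;> omega

-- A's one outer pass, as a function on char lists
def stepA (t : List Char) : List Char :=
  let blank := (PySem.List.pyRange 0 (t.length : Int) 1).foldl
    (fun (b : List Char × List Char) i =>
      if PySem.Int.mod i 2 = 0 then (b.1 ++ [PySem.List.pyGetD t i ' '], b.2)
      else (b.1, b.2 ++ [PySem.List.pyGetD t i ' ']))
    ([], [])
  blank.2 ++ blank.1

lemma pairfold (l : List Int) (g : Int → Char) (b1 b2 : List Char) :
    l.foldl (fun (b : List Char × List Char) i =>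
      if PySem.Int.mod i 2 = 0 then (b.1 ++ [g i], b.2) else (b.1, b.2 ++ [g i])) (b1, b2)
    = (b1 ++ (l.filter (fun i => decide (PySem.Int.mod i 2 = 0))).map g,
       b2 ++ (l.filter (fun i => !decide (PySem.Int.mod i 2 = 0))).map g) := by
  induction l generalizing b1 b2 with
  | nil => simp
  | cons a l ih =>
    rw [List.foldl_cons]
    by_cases h : PySem.Int.mod a 2 = 0
    · have hd : (2:Int) ∣ a := (PySem.Int.mod_eq_zero_iff_dvd a 2).mp h
      have hm : ¬ a % 2 = 1 := by omega
      rw [if_pos h, ih]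
      simp [List.filter_cons, hd, hm]
    · have hd : ¬ (2:Int) ∣ a := fun d => h ((PySem.Int.mod_eq_zero_iff_dvd a 2).mpr d)
      have hm : a % 2 = 1 := by omega
      rw [if_neg h, ih]
      simp [List.filter_cons, hd, hm]

lemma filter_even_range (L : Nat) :
    (List.range L).filter (fun k => k % 2 == 0) = (List.range ((L+1)/2)).map (fun j => 2*j) := by
  induction L with
  | zero => rfl
  | succ L ih =>
    rw [List.range_succ, List.filter_append, ih]
    by_cases h : L % 2 = 0
    · have h2 : (L+1+1)/2 = (L+1)/2 + 1 := by omega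
      have h3 : 2 * ((L+1)/2) = L := by omega
      simp [h, h2, List.range_succ, h3]
    · have h2 : (L+1+1)/2 = (L+1)/2 := by omega
      simp [h, h2, Nat.mod_two_ne_zero.mp h]

lemma filter_odd_range (L : Nat) :
    (List.range L).filter (fun k => !(k % 2 == 0)) = (List.range (L/2)).map (fun j => 2*j+1) := by
  induction L with
  | zero => rfl
  | succ L ih =>
    rw [List.range_succ, List.filter_append, ih]
    by_cases h : L % 2 = 0
    · have h2 : (L+1)/2 = L/2 := by omega
      simp [h, h2]
    · have h2 : (L+1)/2 = L/2 + 1 := by omega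
      have h3 : 2 * (L/2) + 1 = L := by omega
      simp [h, h2, List.range_succ, h3, Nat.mod_two_ne_zero.mp h]

-- stepA rewritten as a source-index map
lemma stepA_eq (t : List Char) :
    stepA t = (List.range t.length).map (fun j => t.getD (fsrc t.length j) ' ') := by
  unfold stepA
  rw [PySem.List.pyRange_one]
  simp only [sub_zero, Int.toNat_natCast]
  have hmap : (List.range t.length).map (fun k : Nat => (0 : Int) + k)
      = (List.range t.length).map (fun k : Nat => (k : Int)) := by simp
  rw [hmap, List.foldl_map]
  have := pairfold ((List.range t.length).map (fun k : Nat => (k : Int))) (fun i => PySem.List.pyGetD t i ' ') [] []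
  rw [List.foldl_map] at this
  rw [this]
  simp only [List.nil_append]
  rw [List.filter_map, List.filter_map, List.map_map, List.map_map]
  have hmod : ∀ k : Nat, PySem.Int.mod (k : Int) 2 = ((k % 2 : Nat) : Int) := by
    intro k; exact_mod_cast PySem.Int.mod_natCast k 2
  have hp : ((fun i : Int => decide (PySem.Int.mod i 2 = 0)) ∘ (fun k : Nat => (k : Int)))
      = (fun k : Nat => k % 2 == 0) := by
    funext k
    simp only [Function.comp_apply, hmod k]
    rcases Nat.mod_two_eq_zero_or_one k with h | h <;> simp [h]
  have hq : ((fun i : Int => !decide (PySem.Int.mod i 2 = 0)) ∘ (fun k : Nat => (k : Int)))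
      = (fun k : Nat => !(k % 2 == 0)) := by
    funext k
    simp only [Function.comp_apply, hmod k]
    rcases Nat.mod_two_eq_zero_or_one k with h | h <;> simp [h]
  rw [show ((fun i : Int => decide (PySem.Int.mod i 2 = 0)) ∘ fun k : Nat => (k : Int)) = _ from hp,
      show ((fun i : Int => !decide (PySem.Int.mod i 2 = 0)) ∘ fun k : Nat => (k : Int)) = _ from hq]
  rw [filter_even_range, filter_odd_range]
  set L := t.length with hL
  have hsplit : List.range L = List.range (L/2) ++ (List.range (L - L/2)).map (L/2 + ·) := by
    rw [← List.range_add]; congr 1; omega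
  rw [hsplit, List.map_append, List.map_map, List.map_map, List.map_map]
  congr 1
  · apply List.map_congr_left
    intro j hj
    simp only [List.mem_range] at hj
    simp only [Function.comp_apply, PySem.List.pyGetD_natCast]
    simp [fsrc, hj]
  · have hlen : L - L/2 = (L+1)/2 := by omega
    rw [hlen]
    apply List.map_congr_left
    intro j hj
    simp only [List.mem_range] at hj
    have hnlt : ¬ (L/2 + j < L/2) := by omega
    simp only [Function.comp_apply, PySem.List.pyGetD_natCast]
    simp [fsrc, hnlt]

lemma foldl_const_iterate (l : List Int) (t0 : List Char) :
    l.foldl (fun t _ => stepA t) t0 = stepA^[l.length] t0 := by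
  induction l generalizing t0 with
  | nil => rfl
  | cons a l ih => simp [List.foldl_cons, ih, Function.iterate_succ_apply]

lemma iterA (m : Nat) (t : List Char) :
    stepA^[m] t = (List.range t.length).map (fun j => t.getD ((fsrc t.length)^[m] j) ' ') := by
  induction m with
  | zero =>
    simp only [Function.iterate_zero, id_eq]
    apply List.ext_getElem (by simp)
    intro i h1 h2
    simp at h2
    simp [h2]
  | succ m ih =>
    rw [Function.iterate_succ_apply', ih, stepA_eq]
    simp only [List.length_map, List.length_range]
    apply List.map_congr_left
    intro j hj
    simp only [List.mem_range] at hj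
    rw [PySem.List.getD_map_range _ _ _ _ (fsrc_lt hj)]
    rw [← Function.iterate_succ_apply]

-- the whole of A, closed form
lemma encrypt_closed (text : String) (n : Int) :
    encrypt text n = String.mk ((List.range text.toList.length).map
      (fun j => text.toList.getD ((fsrc text.toList.length)^[n.toNat] j) ' ')) := by
  unfold encrypt
  have h1 : (PySem.List.pyRange 0 n 1).foldl (fun (t : List Char) _ =>
      stepA t) text.toList = stepA^[n.toNat] text.toList := by
    rw [foldl_const_iterate, PySem.List.length_pyRange_one]
    congr 1; omega
  rw [show (fun (t : List Char) (_ : Int) =>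
      (let blank := (PySem.List.pyRange 0 (t.length : Int) 1).foldl
        (fun (b : List Char × List Char) i =>
          if PySem.Int.mod i 2 = 0 then (b.1 ++ [PySem.List.pyGetD t i ' '], b.2)
          else (b.1, b.2 ++ [PySem.List.pyGetD t i ' ']))
        ([], [])
      blank.2 ++ blank.1)) = (fun t _ => stepA t) from rfl, h1, iterA]

-- B-side: the square-and-multiply loop computes iterated composition
lemma bloop_spec (L : Nat) : ∀ (e : Nat) (g h : Nat → Nat),
    (∀ j, j < L → g j < L) → (∀ j, j < L → h j < L) →
    bSquareLoop ((List.range L).map g) ((List.range L).map h) e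
      = (List.range L).map (fun j => g^[e] (h j)) := by
  intro e
  induction e using Nat.strong_induction_on with
  | _ e ih =>
    intro g h hg hh
    by_cases he : e = 0
    · subst he; rw [bSquareLoop]; simp
    · rw [bSquareLoop]
      simp only [he, if_false]
      have hsq : ((List.range L).map g).map (fun k => ((List.range L).map g).getD k 0)
          = (List.range L).map (fun j => g (g j)) := by
        rw [List.map_map]
        apply List.map_congr_left
        intro j hj
        simp only [List.mem_range] at hj
        simp only [Function.comp_apply]
        exact PySem.List.getD_map_range g L (g j) 0 (hg j hj)
      have hmul : ((List.range L).map h).map (fun k => ((List.range L).map g).getD k 0)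
          = (List.range L).map (fun j => g (h j)) := by
        rw [List.map_map]
        apply List.map_congr_left
        intro j hj
        simp only [List.mem_range] at hj
        simp only [Function.comp_apply]
        exact PySem.List.getD_map_range g L (h j) 0 (hh j hj)
      have hgg : ∀ j, j < L → g (g j) < L := fun j hj => hg _ (hg j hj)
      have hpow : ∀ x, (fun j => g (g j))^[e / 2] x = g^[2 * (e/2)] x := by
        intro x
        have h2 : (fun j => g (g j)) = g^[2] := by
          funext y
          simp [Function.iterate_succ_apply]
        rw [h2, ← Function.iterate_mul]
      by_cases hodd : e % 2 = 1
      · simp only [hodd, if_true]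
        rw [hsq, hmul, ih (e/2) (by omega) _ _ hgg (fun j hj => hg _ (hh j hj))]
        apply List.map_congr_left
        intro j _
        rw [hpow, ← Function.iterate_succ_apply]
        congr 1
        omega
      · simp only [hodd, if_false]
        rw [hsq, ih (e/2) (by omega) _ _ hgg hh]
        apply List.map_congr_left
        intro j _
        rw [hpow]
        congr 1
        omega

lemma bloop_spec' (L e : Nat) (g : Nat → Nat) (hg : ∀ j, j < L → g j < L) :
    bSquareLoop ((List.range L).map g) (List.range L) e = (List.range L).map (fun j => g^[e] j) := by
  have h := bloop_spec L e g (fun j => j) hg (fun j hj => hj)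
  simpa using h

lemma encrypt_alt_closed (text : String) (n : Int) :
    encrypt_alt text n = String.mk ((List.range text.toList.length).map
      (fun j => text.toList.getD ((fsrc text.toList.length)^[n.toNat] j) ' ')) := by
  have he : (if 0 < n then n.toNat else 0) = n.toNat := by
    split_ifs with h
    · rfl
    · omega
  show String.mk ((bSquareLoop
      ((List.range text.toList.length).map (fsrc text.toList.length))
      (List.range text.toList.length) (if 0 < n then n.toNat else 0)).map
      (fun k => text.toList.getD k ' ')) = _
  rw [he, bloop_spec' _ _ _ (fun j hj => fsrc_lt hj), List.map_map]
  rfl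

-- ===== VERDICT (by name: the statement is the Claim_ definition above) =====
theorem encrypt_spec : Claim_equal_encrypt := by
  intro text n _
  unfold Spec_encrypt
  rw [encrypt_closed, encrypt_alt_closed]
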